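-- pv_equiv track=rewrite | github.com/pypi-data/pypi-mirror-373 | packages/outlier-library/outlier_library-0.1.1.tar.gz/outlier_library-0.1.1/outlier/outlierGroup/binning.py | eq_freq_bin
-- ===== SOURCE A (Python) =====
-- def eq_freq_bin(data, bins=5):
--     if not data:
--         return {}
--
--     sorted_data = sorted(data)
--     n = len(sorted_data)
--     bin_size = max(1, n // bins)
--
--     bins_dict = {}
--     for i in range(bins):
--         start = i * bin_size
--         end = (i + 1) * bin_size if i < bins - 1 else n
--         bins_dict[f"bin_{i+1}"] = sorted_data[start:end]
--
--     return bins_dict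
-- ===== SOURCE B (Python) =====
-- def eq_freq_bin(data, bins=5):
--     if not data:
--         return {}
--
--     rest = sorted(data, reverse=True)  # descending: the smallest elements sit at the end
--     size = max(1, len(rest) // bins)
--
--     out = {}
--     for i in range(1, bins):
--         chunk = rest[-size:]
--         chunk.reverse()
--         out[f"bin_{i}"] = chunk
--         del rest[-size:]
--     rest.reverse()
--     out[f"bin_{bins}"] = rest
--     return out
-- ===== Notes on version B (the rewrite author's own statement) =====
-- stated objective: alternative
-- what changed: Instead of computing start/end indices per bin and slicing the full ascending-sorted list, B sorts descending and consumes the remainder from its tail: each of the first bins-1 bins takes (and deletes) the last `size` elements, reversed, and the last bin gets the reversed leftover outside the loop.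
-- outside the precondition, e.g. on eq_freq_bin([1], -1): A returns {}, B returns {'bin_-1': [1]}; on eq_freq_bin([1], 0): A raises ZeroDivisionError, B raises ZeroDivisionError
import Mathlib
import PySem

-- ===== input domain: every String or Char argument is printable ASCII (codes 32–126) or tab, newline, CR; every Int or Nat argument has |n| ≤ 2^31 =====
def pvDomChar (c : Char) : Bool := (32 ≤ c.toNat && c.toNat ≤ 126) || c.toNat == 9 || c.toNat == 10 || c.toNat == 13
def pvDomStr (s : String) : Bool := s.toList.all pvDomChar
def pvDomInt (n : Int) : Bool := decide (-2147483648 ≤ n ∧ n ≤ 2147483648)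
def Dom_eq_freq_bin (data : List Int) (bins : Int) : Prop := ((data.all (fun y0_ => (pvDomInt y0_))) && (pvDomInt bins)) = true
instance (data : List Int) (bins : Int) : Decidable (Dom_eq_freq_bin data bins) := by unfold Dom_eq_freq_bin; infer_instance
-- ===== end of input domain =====

-- B replaces A's per-bin start/end index arithmetic and slicing of the full sorted list by
-- consuming a descending-sorted remainder from its tail (each bin takes and deletes the last
-- `size` elements; the last bin is assigned the leftover outside the loop); an alternative of
-- similar cost, not claimed faster.

-- ===== PORT A =====
-- loop body of A: bins_dict[f"bin_{i+1}"] = sorted_data[start:end]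
def pvAStep (l : List Int) (bins binSize : Int) (d : PySem.Dict String (List Int)) (i : Int) :
    PySem.Dict String (List Int) :=
  let start := i * binSize
  let stop := if i < bins - 1 then (i + 1) * binSize else PySem.List.len l
  d.insert ("bin_" ++ PySem.Int.toStr (i + 1)) (PySem.List.slice l (some start) (some stop))

def eq_freq_bin (data : List Int) (bins : Int) : List (String × List Int) :=
  if data = [] then []
  else
    let sortedData := PySem.List.sorted data (fun x => x) false
    let n := PySem.List.len sortedData
    let binSize := max 1 (PySem.Int.floordiv n bins)
    ((PySem.List.pyRange 0 bins 1).foldl (pvAStep sortedData bins binSize) PySem.Dict.empty).items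

-- ===== PORT B =====
-- loop body of B: chunk = rest[-size:]; chunk.reverse(); out[f"bin_{i}"] = chunk; del rest[-size:]
def pvBStep (size : Int) (st : PySem.Dict String (List Int) × List Int) (i : Int) :
    PySem.Dict String (List Int) × List Int :=
  (st.1.insert ("bin_" ++ PySem.Int.toStr i)
     (PySem.List.slice st.2 (some (-size)) none).reverse,
   PySem.List.slice st.2 none (some (-size)))

def eq_freq_bin_alt (data : List Int) (bins : Int) : List (String × List Int) :=
  if data = [] then []
  else
    let rest := PySem.List.sorted data (fun x => x) true
    let size := max 1 (PySem.Int.floordiv (PySem.List.len rest) bins)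
    let st := (PySem.List.pyRange 1 bins 1).foldl (pvBStep size) (PySem.Dict.empty, rest)
    (st.1.insert ("bin_" ++ PySem.Int.toStr bins) st.2.reverse).items

-- ===== PRECONDITION & SPEC =====
-- Pre_ excludes bins ≤ 0: at bins = 0 A raises ZeroDivisionError (so does B); for bins < 0 a bin
-- count is meaningless and A's empty dict is an accident of the empty range(bins), where B
-- returns one catch-all bin — a corner no caller would specify.
def Pre_eq_freq_bin (data : List Int) (bins : Int) : Prop := 1 ≤ bins
instance (data : List Int) (bins : Int) : Decidable (Pre_eq_freq_bin data bins) := by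
  unfold Pre_eq_freq_bin; infer_instance

def pvWitness_eq_freq_bin : List Int × Int := ([3, 1, 2], 2)

def Spec_eq_freq_bin (data : List Int) (bins : Int) (out : List (String × List Int)) : Prop := out = eq_freq_bin_alt data bins
instance (data : List Int) (bins : Int) (out : List (String × List Int)) : Decidable (Spec_eq_freq_bin data bins out) := by unfold Spec_eq_freq_bin; infer_instance

-- ===== CLAIM (what is proved, stated in full; the proofs are below) =====
def Claim_equal_eq_freq_bin : Prop := ∀ (data : List Int) (bins : Int), Dom_eq_freq_bin data bins → Pre_eq_freq_bin data bins → Spec_eq_freq_bin data bins (eq_freq_bin data bins)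

-- ===== LEMMAS AND PROOFS =====

-- sorted(xs, reverse=True) is the reverse of sorted(xs) (identity key on Int: ties are equal values)
theorem pv_sorted_rev_eq_reverse (xs : List Int) :
    PySem.List.sorted xs (fun x => x) true = (PySem.List.sorted xs (fun x => x) false).reverse := by
  refine List.Perm.eq_of_pairwise (le := fun a b : Int => b ≤ a)
    (fun a b _ _ h1 h2 => le_antisymm h2 h1) ?_ ?_ ?_
  · exact PySem.List.sorted_pairwise_rev xs (fun x => x)
  · rw [List.pairwise_reverse]
    exact PySem.List.sorted_pairwise xs (fun x => x)
  · exact ((PySem.List.sorted_perm xs (fun x => x) true).trans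
      (PySem.List.sorted_perm xs (fun x => x) false).symm).trans
      (List.reverse_perm _).symm

-- The bridge: A's fold from index m equals B's fold from index m+1 started on the reversed
-- remainder (l.drop (m*s)).reverse, followed by the final assignment of the last bin.
theorem pv_bridge (l : List Int) (bins s : Int) (hs : 1 ≤ s) :
    ∀ (t : Nat) (m : Int) (d : PySem.Dict String (List Int)),
      0 ≤ m → m < bins → (bins - 1 - m).toNat = t →
      (PySem.List.pyRange m bins 1).foldl (pvAStep l bins s) d
        = (((PySem.List.pyRange (m + 1) bins 1).foldl (pvBStep s)
              (d, (l.drop (m * s).toNat).reverse)).1.insert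
            ("bin_" ++ PySem.Int.toStr bins)
            ((PySem.List.pyRange (m + 1) bins 1).foldl (pvBStep s)
              (d, (l.drop (m * s).toNat).reverse)).2.reverse) := by
  have hs0 : (0:Int) ≤ s := by omega
  intro t
  induction t with
  | zero =>
    intro m d hm hmb ht
    have hmb1 : m = bins - 1 := by omega
    subst hmb1
    rw [PySem.List.pyRange_one_cons (by omega : bins - 1 < bins),
        PySem.List.pyRange_one_eq_nil (by omega : bins ≤ bins - 1 + 1)]
    simp only [List.foldl_cons, List.foldl_nil, pvAStep, List.reverse_reverse]
    rw [if_neg (by omega), PySem.List.slice_toNat l (mul_nonneg (by omega) hs0)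
          (by simp [PySem.List.len_eq] : (0:Int) ≤ PySem.List.len l)]
    have h2 : bins - 1 + 1 = bins := by ring
    rw [h2, List.take_of_length_le (by simp [PySem.List.len_eq])]
  | succ t ih =>
    intro m d hm hmb ht
    have h1 : m < bins - 1 := by omega
    rw [PySem.List.pyRange_one_cons (show m < bins by omega)]
    conv_rhs => rw [PySem.List.pyRange_one_cons (show m + 1 < bins by omega)]
    simp only [List.foldl_cons]
    have hcast : -s = -((s.toNat : Nat) : Int) := by
      rw [Int.toNat_of_nonneg hs0]
    have hadd : (m + 1) * s = m * s + s := by ring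
    have htn : ((m + 1) * s).toNat = (m * s).toNat + s.toNat := by
      rw [hadd, Int.toNat_add (mul_nonneg hm hs0) hs0]
    have hkey : pvBStep s (d, (l.drop (m * s).toNat).reverse) (m + 1)
        = (pvAStep l bins s d m, (l.drop ((m + 1) * s).toNat).reverse) := by
      simp only [pvBStep, pvAStep, if_pos h1, Prod.mk.injEq]
      have hlen : (List.drop (m * s).toNat l).length = l.length - (m * s).toNat :=
        List.length_drop
      constructor
      · rw [hcast, PySem.List.slice_from_neg_natCast _ s.toNat (by omega),
            PySem.List.slice_toNat l (mul_nonneg hm hs0) (mul_nonneg (by omega) hs0), htn,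
            List.length_reverse, List.drop_reverse, List.reverse_reverse]
        congr 1
        apply List.take_eq_take_iff.mpr
        omega
      · rw [hcast, PySem.List.slice_to_neg_natCast _ s.toNat (by omega),
            List.length_reverse, List.take_reverse, List.drop_drop, htn]
        congr 1
        by_cases hle : s.toNat ≤ (List.drop (m * s).toNat l).length
        · congr 1
          omega
        · rw [List.drop_eq_nil_of_le (by omega), List.drop_eq_nil_of_le (by omega)]
    rw [hkey]
    exact ih (m + 1) (pvAStep l bins s d m) (by omega) (by omega) (by omega)

-- ===== VERDICT =====
theorem eq_freq_bin_spec : Claim_equal_eq_freq_bin := by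
  intro data bins hdom hpre
  unfold Pre_eq_freq_bin at hpre
  unfold Spec_eq_freq_bin
  by_cases hd : data = []
  · simp [eq_freq_bin, eq_freq_bin_alt, hd]
  · simp only [eq_freq_bin, eq_freq_bin_alt, if_neg hd, pv_sorted_rev_eq_reverse,
      PySem.List.len_eq, List.length_reverse]
    have hs : (1:Int) ≤ max 1 (PySem.Int.floordiv
        ((PySem.List.sorted data (fun x => x) false).length : Int) bins) := le_max_left 1 _
    have hb := pv_bridge (PySem.List.sorted data (fun x => x) false) bins
      (max 1 (PySem.Int.floordiv ((PySem.List.sorted data (fun x => x) false).length : Int) bins))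
      hs (bins - 1).toNat 0 PySem.Dict.empty (le_refl 0) (by omega) (by omega)
    simp only [zero_mul, Int.toNat_zero, List.drop_zero, zero_add] at hb
    rw [hb]
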